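-- pv_equiv track=rewrite | github.com/cirosantilli/project-euler-solutions | solvers/764.py | squarefree_divs_mu
-- ===== SOURCE A (Python) =====
-- def _factor_unique_primes(n: int, spf: list[int]) -> list[int]:
--     primes: list[int] = []
--     while n > 1:
--         p = spf[n]
--         primes.append(p)
--         while n % p == 0:
--             n //= p
--     return primes
--
-- def squarefree_divs_mu(
--     n: int, spf: list[int], cache: dict[int, list[tuple[int, int, int, int]]]
-- ) -> list[tuple[int, int, int, int]]:
--     """Return squarefree divisors d of n together with μ(d), plus d and d^4.
--
--     Output tuples are (d, mu, d, d4).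
--     Only squarefree divisors matter because μ(d)=0 otherwise.
--     """
--     if n in cache:
--         return cache[n]
--
--     if n <= 1:
--         cache[n] = [(1, 1, 1, 1)]
--         return cache[n]
--
--     primes = _factor_unique_primes(n, spf)
--
--     divs: list[tuple[int, int]] = [(1, 1)]
--     for p in primes:
--         divs += [(d * p, -mu) for (d, mu) in divs]
--
--     out: list[tuple[int, int, int, int]] = []
--     for d, mu in divs:
--         d4 = d * d * d * d
--         out.append((d, mu, d, d4))
--
--     cache[n] = out
--     return out
-- ===== SOURCE B (Python) =====
-- def _factor_unique_primes(n, spf):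
--     primes = []
--     while n > 1:
--         p = spf[n]
--         primes.append(p)
--         while n % p == 0:
--             n //= p
--     return primes
--
--
-- def _combos(choices):
--     """Cartesian product of the choice lists (first list varies slowest)."""
--     if not choices:
--         return [[]]
--     rest = _combos(choices[1:])
--     return [[x] + t for x in choices[0] for t in rest]
--
--
-- def squarefree_divs_mu(n, spf, cache):
--     if n in cache:
--         return cache[n]
--
--     if n <= 1:
--         cache[n] = [(1, 1, 1, 1)]
--         return cache[n]
--
--     primes = _factor_unique_primes(n, spf)
--
--     # One choice per prime: omit it (factor 1, sign +1) or include it (factor p,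
--     # sign -1).  Reversed so that the first prime varies fastest, matching the
--     # doubling order.
--     choices = [[(1, 1), (p, -1)] for p in reversed(primes)]
--
--     out = []
--     for combo in _combos(choices):
--         d = 1
--         mu = 1
--         for v, s in combo:
--             d *= v
--             mu *= s
--         out.append((d, mu, d, d * d * d * d))
--
--     cache[n] = out
--     return out
-- ===== Notes on version B (the rewrite author's own statement) =====
-- stated objective: alternative
-- what changed: The incremental doubling loop over the divisor list is replaced by a direct Cartesian-product enumeration: one two-way choice list [(1,1),(p,-1)] per prime (over reversed primes so the first prime varies fastest), each combination multiplied out to (d, mu, d, d^4).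
import Mathlib
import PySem

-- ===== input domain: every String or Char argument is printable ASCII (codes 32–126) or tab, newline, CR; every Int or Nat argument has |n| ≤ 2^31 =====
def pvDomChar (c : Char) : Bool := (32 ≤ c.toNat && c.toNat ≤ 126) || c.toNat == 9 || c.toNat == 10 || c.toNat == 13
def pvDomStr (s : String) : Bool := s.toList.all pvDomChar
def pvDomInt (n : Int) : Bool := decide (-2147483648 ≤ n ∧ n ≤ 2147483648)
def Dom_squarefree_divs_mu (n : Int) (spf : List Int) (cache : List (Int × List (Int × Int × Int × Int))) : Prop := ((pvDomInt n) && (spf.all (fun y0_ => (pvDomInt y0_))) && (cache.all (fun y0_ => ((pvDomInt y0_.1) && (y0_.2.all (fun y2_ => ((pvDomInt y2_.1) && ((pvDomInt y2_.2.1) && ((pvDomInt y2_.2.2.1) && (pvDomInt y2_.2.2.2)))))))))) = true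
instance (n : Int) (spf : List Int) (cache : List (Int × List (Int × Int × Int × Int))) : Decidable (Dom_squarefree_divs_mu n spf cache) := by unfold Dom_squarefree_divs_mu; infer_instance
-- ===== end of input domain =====

-- B replaces A's incremental doubling of the divisor list by a Cartesian-product
-- enumeration of per-prime choices (alternative decomposition, same cost).
-- Python A and B both MUTATE `cache` in place; the equivalence proved here is about
-- the RETURN value only (both perform the same insertion).

-- ===== PORT A =====
-- inner loop `while n % p == 0: n //= p` (fueled; fuel n.toNat+1 suffices whenever the
-- Python loop terminates, since each step divides n by p ≥ 2)
def pvStrip : Nat → Int → Int → Int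
  | 0, n, _ => n
  | f + 1, n, p =>
    if PySem.Int.mod n p = 0 then pvStrip f (PySem.Int.floordiv n p) p else n

-- outer loop of _factor_unique_primes (fueled; each iteration strictly shrinks n on Pre_)
def pvFactorGo : Nat → Int → List Int → List Int
  | 0, _, _ => []
  | f + 1, n, spf =>
    if 1 < n then
      let p := PySem.List.pyGetD spf n 0
      p :: pvFactorGo f (pvStrip (n.toNat + 1) n p) spf
    else []

-- shared helper: both Python files contain the identical _factor_unique_primes
def pvFactorUniquePrimes (n : Int) (spf : List Int) : List Int :=
  pvFactorGo (n.toNat + 1) n spf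

def squarefree_divs_mu (n : Int) (spf : List Int) (cache : List (Int × List (Int × Int × Int × Int))) : List (Int × Int × Int × Int) :=
  match (PySem.Dict.mk cache).get? n with
  | some v => v
  | none =>
    if n ≤ 1 then [(1, 1, 1, 1)]
    else
      let primes := pvFactorUniquePrimes n spf
      let divs := primes.foldl
        (fun divs p => divs ++ divs.map (fun dm => (dm.1 * p, -dm.2))) [((1 : Int), (1 : Int))]
      divs.foldl (fun out dm => out ++ [(dm.1, dm.2, dm.1, dm.1 * dm.1 * dm.1 * dm.1)]) []

-- ===== PORT B =====
-- _combos: Cartesian product of the choice lists, first list varies slowest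
def pvCombos : List (List (Int × Int)) → List (List (Int × Int))
  | [] => [[]]
  | c :: rest => c.flatMap (fun x => (pvCombos rest).map (fun t => x :: t))

def squarefree_divs_mu_alt (n : Int) (spf : List Int) (cache : List (Int × List (Int × Int × Int × Int))) : List (Int × Int × Int × Int) :=
  match (PySem.Dict.mk cache).get? n with
  | some v => v
  | none =>
    if n ≤ 1 then [(1, 1, 1, 1)]
    else
      let primes := pvFactorUniquePrimes n spf
      let choices := primes.reverse.map (fun p => [((1 : Int), (1 : Int)), (p, -1)])
      (pvCombos choices).map (fun combo =>
        let dm := combo.foldl (fun dm vs => (dm.1 * vs.1, dm.2 * vs.2)) ((1 : Int), (1 : Int))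
        (dm.1, dm.2, dm.1, dm.1 * dm.1 * dm.1 * dm.1))

-- ===== PRECONDITION & SPEC =====
-- Pre_ excludes inputs on which Python A raises (IndexError on spf[n], ZeroDivisionError)
-- or loops forever (an spf entry that is < 2 or does not divide its index). It asks the
-- spf table to be valid at EVERY index 2 ≤ i < len(spf), which is slightly narrower than
-- A's return domain: a table wrong only at indices the factorisation never visits still
-- lets A return (and B returns the same value there).
def Pre_squarefree_divs_mu (n : Int) (spf : List Int) (cache : List (Int × List (Int × Int × Int × Int))) : Prop :=
  (PySem.Dict.mk cache).contains n = true ∨ n ≤ 1 ∨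
    (n < (spf.length : Int) ∧
      ∀ i ∈ List.range spf.length, 2 ≤ i →
        2 ≤ spf.getD i 0 ∧ PySem.Int.mod (i : Int) (spf.getD i 0) = 0)
instance (n : Int) (spf : List Int) (cache : List (Int × List (Int × Int × Int × Int))) : Decidable (Pre_squarefree_divs_mu n spf cache) := by unfold Pre_squarefree_divs_mu; infer_instance

def pvWitness_squarefree_divs_mu : Int × List Int × (List (Int × List (Int × Int × Int × Int))) :=
  (6, [0, 1, 2, 3, 2, 5, 2], [])

def Spec_squarefree_divs_mu (n : Int) (spf : List Int) (cache : List (Int × List (Int × Int × Int × Int))) (out : List (Int × Int × Int × Int)) : Prop := out = squarefree_divs_mu_alt n spf cache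
instance (n : Int) (spf : List Int) (cache : List (Int × List (Int × Int × Int × Int))) (out : List (Int × Int × Int × Int)) : Decidable (Spec_squarefree_divs_mu n spf cache out) := by unfold Spec_squarefree_divs_mu; infer_instance

-- ===== CLAIM (what is proved, stated in full; the proofs are below) =====
def Claim_equal_squarefree_divs_mu : Prop := ∀ (n : Int) (spf : List Int) (cache : List (Int × List (Int × Int × Int × Int))), Dom_squarefree_divs_mu n spf cache → Pre_squarefree_divs_mu n spf cache → Spec_squarefree_divs_mu n spf cache (squarefree_divs_mu n spf cache)

-- ===== LEMMAS AND PROOFS =====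

-- the (d, μ) pair B computes from one combination
def pvMulFold (c : List (Int × Int)) : Int × Int :=
  c.foldl (fun dm vs => (dm.1 * vs.1, dm.2 * vs.2)) ((1 : Int), (1 : Int))

theorem pvMulFold_shift (c : List (Int × Int)) (a b : Int) :
    c.foldl (fun dm vs => (dm.1 * vs.1, dm.2 * vs.2)) (a, b)
      = (a * (pvMulFold c).1, b * (pvMulFold c).2) := by
  induction c generalizing a b with
  | nil => simp [pvMulFold]
  | cons x t ih =>
    simp only [pvMulFold, List.foldl_cons] at *
    rw [ih, ih (1 * x.1) (1 * x.2)]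
    ring_nf

theorem pvMulFold_cons (x : Int × Int) (c : List (Int × Int)) :
    pvMulFold (x :: c) = (x.1 * (pvMulFold c).1, x.2 * (pvMulFold c).2) := by
  simp only [pvMulFold, List.foldl_cons, one_mul]
  exact pvMulFold_shift c x.1 x.2

theorem pvDivs_eq_combos (ps : List Int) :
    ps.foldl (fun divs p => divs ++ divs.map (fun dm => (dm.1 * p, -dm.2)))
        [((1 : Int), (1 : Int))]
      = (pvCombos (ps.reverse.map (fun p => [((1 : Int), (1 : Int)), (p, -1)]))).map pvMulFold := by
  induction ps using List.reverseRecOn with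
  | nil => simp [pvCombos, pvMulFold]
  | append_singleton ps q ih =>
    rw [List.foldl_append, List.foldl_cons, List.foldl_nil, ih, List.reverse_append]
    simp only [List.reverse_cons, List.reverse_nil, List.nil_append, List.singleton_append,
      List.map_cons]
    simp only [pvCombos, List.flatMap_cons, List.flatMap_nil, List.append_nil]
    rw [List.map_append, List.map_map, List.map_map, List.map_map]
    congr 1;
      (apply List.map_congr_left
       intro c _
       simp [Function.comp, pvMulFold_cons, mul_comm])

-- ===== VERDICT (by name: the statement is the Claim_ definition above) =====
theorem squarefree_divs_mu_spec : Claim_equal_squarefree_divs_mu := by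
  intro n spf cache _ _
  unfold Spec_squarefree_divs_mu squarefree_divs_mu squarefree_divs_mu_alt
  cases h : (PySem.Dict.mk cache).get? n with
  | some v => rfl
  | none =>
    simp only []
    by_cases hn : n ≤ 1
    · simp [hn]
    · simp only [hn, if_false]
      rw [PySem.List.foldl_append_singleton_eq_map, pvDivs_eq_combos, List.map_map]
      rfl
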